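-- pv_equiv track=rewrite | github.com/sistemas-galdino/chinelaria | legacy/scripts/scraper_chinelaria.py | extract_sizes_and_colors
-- ===== SOURCE A (Python) =====
-- def extract_sizes_and_colors(derivacoes):
--     """Extract sizes and colors from derivacoesItem."""
--     sizes = set()
--     colors = set()
--     if not derivacoes:
--         return "", ""
--     for group in derivacoes:
--         if not isinstance(group, list):
--             continue
--         for item in group:
--             if not isinstance(item, dict):
--                 continue
--             deri_nome = item.get("deri_nome", "")
--             derivacao = item.get("derivacao", "")
--             if not derivacao:
--                 continue
--             if deri_nome == "Tamanho":
--                 sizes.add(derivacao)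
--             elif deri_nome == "Cor":
--                 colors.add(derivacao)
--     return " | ".join(sorted(sizes)) if sizes else "", " | ".join(sorted(colors)) if colors else ""
-- ===== SOURCE B (Python) =====
-- def extract_one(derivacoes, name):
--     """Collect the distinct truthy 'derivacao' values whose 'deri_nome' equals name."""
--     if not derivacoes:
--         return ""
--     found = set()
--     for group in derivacoes:
--         if not isinstance(group, list):
--             continue
--         for item in group:
--             if not isinstance(item, dict):
--                 continue
--             v = item.get("derivacao", "")
--             if v and item.get("deri_nome", "") == name:
--                 found.add(v)
--     return " | ".join(sorted(found))
--
--
-- def extract_sizes_and_colors(derivacoes):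
--     """Extract sizes and colors from derivacoesItem."""
--     return extract_one(derivacoes, "Tamanho"), extract_one(derivacoes, "Cor")
-- ===== Notes on version B (the rewrite author's own statement) =====
-- stated objective: simpler
-- what changed: Replaces A's single fused pass routing values into two parallel sets (plus per-result emptiness guards) by a generic helper extract_one(derivacoes, name) that scans for one attribute name at a time and joins sorted results unconditionally (join of an empty set is already '').
import Mathlib
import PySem

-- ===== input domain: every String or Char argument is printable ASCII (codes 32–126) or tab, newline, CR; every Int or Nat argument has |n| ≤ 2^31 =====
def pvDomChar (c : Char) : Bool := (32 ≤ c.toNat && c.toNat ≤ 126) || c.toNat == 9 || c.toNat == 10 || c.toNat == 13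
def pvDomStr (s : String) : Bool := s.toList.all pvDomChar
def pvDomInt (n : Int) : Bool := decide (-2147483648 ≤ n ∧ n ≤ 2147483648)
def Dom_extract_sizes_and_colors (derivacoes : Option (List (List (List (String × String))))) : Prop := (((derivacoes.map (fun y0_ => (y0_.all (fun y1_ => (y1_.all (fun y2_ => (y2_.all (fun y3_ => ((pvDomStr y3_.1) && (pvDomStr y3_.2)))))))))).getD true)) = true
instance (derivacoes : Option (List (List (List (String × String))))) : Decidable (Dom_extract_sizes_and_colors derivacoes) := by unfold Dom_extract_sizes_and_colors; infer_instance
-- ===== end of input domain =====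

-- B replaces A's single fused pass keeping two parallel sets by a generic one-name helper
-- called twice; the per-result emptiness guards disappear (join of an empty set is '').

-- ===== PORT A =====
-- the body of A's inner loop: route a truthy derivacao into the sizes or colors set
def pvItemA (acc : PySem.Set String × PySem.Set String) (item : List (String × String)) :
    PySem.Set String × PySem.Set String :=
  let deri_nome := (PySem.Dict.mk item).getD "deri_nome" ""
  let derivacao := (PySem.Dict.mk item).getD "derivacao" ""
  if derivacao = "" then acc
  else if deri_nome = "Tamanho" then (PySem.Set.add acc.1 derivacao, acc.2)
  else if deri_nome = "Cor" then (acc.1, PySem.Set.add acc.2 derivacao)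
  else acc

def extract_sizes_and_colors (derivacoes : Option (List (List (List (String × String))))) :
    String × String :=
  match derivacoes with
  | none => ("", "")
  | some ds =>
    if ds = [] then ("", "")
    else
      let p := ds.foldl (fun acc group => group.foldl pvItemA acc)
        ((PySem.Set.empty : PySem.Set String), (PySem.Set.empty : PySem.Set String))
      ((if p.1 = [] then "" else PySem.Str.join " | " (PySem.List.sorted p.1 (fun x => x) false)),
       (if p.2 = [] then "" else PySem.Str.join " | " (PySem.List.sorted p.2 (fun x => x) false)))

-- ===== PORT B =====
-- the body of B's inner loop: add a truthy derivacao whose deri_nome equals `name`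
def pvItemB (name : String) (s : PySem.Set String) (item : List (String × String)) :
    PySem.Set String :=
  let v := (PySem.Dict.mk item).getD "derivacao" ""
  if v ≠ "" ∧ (PySem.Dict.mk item).getD "deri_nome" "" = name then PySem.Set.add s v else s

def extract_one (derivacoes : Option (List (List (List (String × String))))) (name : String) :
    String :=
  match derivacoes with
  | none => ""
  | some ds =>
    if ds = [] then ""
    else
      PySem.Str.join " | "
        (PySem.List.sorted
          (ds.foldl (fun s group => group.foldl (pvItemB name) s) (PySem.Set.empty : PySem.Set String))
          (fun x => x) false)

def extract_sizes_and_colors_alt (derivacoes : Option (List (List (List (String × String))))) :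
    String × String :=
  (extract_one derivacoes "Tamanho", extract_one derivacoes "Cor")

-- ===== PRECONDITION & SPEC =====
def Spec_extract_sizes_and_colors (derivacoes : Option (List (List (List (String × String))))) (out : String × String) : Prop := out = extract_sizes_and_colors_alt derivacoes
instance (derivacoes : Option (List (List (List (String × String))))) (out : String × String) : Decidable (Spec_extract_sizes_and_colors derivacoes out) := by unfold Spec_extract_sizes_and_colors; infer_instance

-- ===== CLAIM (what is proved, stated in full; the proofs are below) =====
def Claim_equal_extract_sizes_and_colors : Prop := ∀ (derivacoes : Option (List (List (List (String × String))))), Dom_extract_sizes_and_colors derivacoes → Spec_extract_sizes_and_colors derivacoes (extract_sizes_and_colors derivacoes)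

-- ===== LEMMAS AND PROOFS =====

theorem pvItemA_eq (acc : PySem.Set String × PySem.Set String) (item : List (String × String)) :
    pvItemA acc item = (pvItemB "Tamanho" acc.1 item, pvItemB "Cor" acc.2 item) := by
  simp only [pvItemA, pvItemB]
  split_ifs <;> simp_all

theorem group_fold_eq (group : List (List (String × String)))
    (acc : PySem.Set String × PySem.Set String) :
    group.foldl pvItemA acc =
      (group.foldl (pvItemB "Tamanho") acc.1, group.foldl (pvItemB "Cor") acc.2) := by
  induction group generalizing acc with
  | nil => rfl
  | cons item rest ih =>
    simp only [List.foldl_cons, pvItemA_eq]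
    exact ih _

theorem ds_fold_eq (ds : List (List (List (String × String))))
    (acc : PySem.Set String × PySem.Set String) :
    ds.foldl (fun acc group => group.foldl pvItemA acc) acc =
      (ds.foldl (fun s group => group.foldl (pvItemB "Tamanho") s) acc.1,
       ds.foldl (fun s group => group.foldl (pvItemB "Cor") s) acc.2) := by
  induction ds generalizing acc with
  | nil => rfl
  | cons g rest ih =>
    rw [List.foldl_cons, group_fold_eq]
    exact ih _

theorem join_empty_guard (s : PySem.Set String) :
    (if s = [] then "" else PySem.Str.join " | " (PySem.List.sorted s (fun x => x) false)) =
      PySem.Str.join " | " (PySem.List.sorted s (fun x => x) false) := by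
  split_ifs with h
  · subst h; decide
  · rfl

-- ===== VERDICT (by name: the statement is the Claim_ definition above) =====
theorem extract_sizes_and_colors_spec : Claim_equal_extract_sizes_and_colors := by
  intro derivacoes _
  unfold Spec_extract_sizes_and_colors extract_sizes_and_colors extract_sizes_and_colors_alt extract_one
  match derivacoes with
  | none => rfl
  | some ds =>
    by_cases h : ds = []
    · simp [h]
    · simp only [h, if_false, ds_fold_eq, join_empty_guard]
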